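-- pv_equiv track=rewrite | github.com/CERN/pts-framework | clim_chamber.py | calculate_chamber_steps
-- ===== SOURCE A (Python) =====
-- def calculate_chamber_steps(t_steps, t_step, t_min, rh_steps, rh_step, rh_min):
--     temperatures = []
--     humidities = []
--     for i in range(t_steps):
--         for j in range(rh_steps):
--             temperatures.append(t_min + i * t_step)
--             humidities.append(rh_min + j * rh_step)
--     return {"temperatures": temperatures, "humidities": humidities}
-- ===== SOURCE B (Python) =====
-- def calculate_chamber_steps(t_steps, t_step, t_min, rh_steps, rh_step, rh_min):
--     total = max(t_steps, 0) * max(rh_steps, 0)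
--     temperatures = [t_min + (k // rh_steps) * t_step for k in range(total)]
--     humidities = [rh_min + (k % rh_steps) * rh_step for k in range(total)]
--     return {"temperatures": temperatures, "humidities": humidities}
-- ===== Notes on version B (the rewrite author's own statement) =====
-- stated objective: alternative
-- what changed: Replaces A's nested double loop with a single flat-index pass: total = max(t_steps,0)*max(rh_steps,0) cells, and each list is produced by one comprehension over the flat index k, recovering the grid coordinates arithmetically via k // rh_steps and k % rh_steps.
import Mathlib
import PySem

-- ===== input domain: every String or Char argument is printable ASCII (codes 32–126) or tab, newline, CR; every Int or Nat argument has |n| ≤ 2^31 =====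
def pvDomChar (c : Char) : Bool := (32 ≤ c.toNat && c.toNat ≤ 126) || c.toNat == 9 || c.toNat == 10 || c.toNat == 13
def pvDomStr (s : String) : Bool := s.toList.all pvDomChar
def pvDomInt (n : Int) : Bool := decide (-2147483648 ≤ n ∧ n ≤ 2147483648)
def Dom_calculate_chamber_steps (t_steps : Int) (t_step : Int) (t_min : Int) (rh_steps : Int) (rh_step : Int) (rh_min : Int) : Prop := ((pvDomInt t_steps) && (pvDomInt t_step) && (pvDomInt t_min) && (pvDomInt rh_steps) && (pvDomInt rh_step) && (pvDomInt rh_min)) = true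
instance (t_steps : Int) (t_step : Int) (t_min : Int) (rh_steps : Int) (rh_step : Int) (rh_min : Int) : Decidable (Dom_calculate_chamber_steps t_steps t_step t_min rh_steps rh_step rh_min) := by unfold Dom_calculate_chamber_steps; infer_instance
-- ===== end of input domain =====

-- B replaces A's nested double loop by a single flat-index pass over the grid cells,
-- recovering the coordinates arithmetically with // and %; objective: alternative, same cost.

-- ===== PORT A =====
def calculate_chamber_steps (t_steps : Int) (t_step : Int) (t_min : Int) (rh_steps : Int) (rh_step : Int) (rh_min : Int) : List (String × List Int) :=
  let st := (PySem.List.pyRange 0 t_steps 1).foldl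
    (fun (p : List Int × List Int) i =>
      (PySem.List.pyRange 0 rh_steps 1).foldl
        (fun (q : List Int × List Int) j =>
          (q.1 ++ [t_min + i * t_step], q.2 ++ [rh_min + j * rh_step])) p)
    ([], [])
  [("temperatures", st.1), ("humidities", st.2)]

-- ===== PORT B =====
def calculate_chamber_steps_alt (t_steps : Int) (t_step : Int) (t_min : Int) (rh_steps : Int) (rh_step : Int) (rh_min : Int) : List (String × List Int) :=
  let total := max t_steps 0 * max rh_steps 0
  let temperatures := (PySem.List.pyRange 0 total 1).map
    (fun k => t_min + (PySem.Int.floordiv k rh_steps) * t_step)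
  let humidities := (PySem.List.pyRange 0 total 1).map
    (fun k => rh_min + (PySem.Int.mod k rh_steps) * rh_step)
  [("temperatures", temperatures), ("humidities", humidities)]

-- ===== PRECONDITION & SPEC =====
def Spec_calculate_chamber_steps (t_steps : Int) (t_step : Int) (t_min : Int) (rh_steps : Int) (rh_step : Int) (rh_min : Int) (out : List (String × List Int)) : Prop := out = calculate_chamber_steps_alt t_steps t_step t_min rh_steps rh_step rh_min
instance (t_steps : Int) (t_step : Int) (t_min : Int) (rh_steps : Int) (rh_step : Int) (rh_min : Int) (out : List (String × List Int)) : Decidable (Spec_calculate_chamber_steps t_steps t_step t_min rh_steps rh_step rh_min out) := by unfold Spec_calculate_chamber_steps; infer_instance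

-- ===== CLAIM =====
def Claim_equal_calculate_chamber_steps : Prop := ∀ (t_steps : Int) (t_step : Int) (t_min : Int) (rh_steps : Int) (rh_step : Int) (rh_min : Int), Dom_calculate_chamber_steps t_steps t_step t_min rh_steps rh_step rh_min → Spec_calculate_chamber_steps t_steps t_step t_min rh_steps rh_step rh_min (calculate_chamber_steps t_steps t_step t_min rh_steps rh_step rh_min)

-- ===== LEMMAS AND PROOFS =====

-- A's inner loop appends the constant temperature rh_steps times and the 1-D humidity table once.
theorem inner_loop_eq (rh_step rh_min tv : Int) (n : Nat) (acc : List Int × List Int) :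
    (List.range n).foldl
      (fun (q : List Int × List Int) (k : Nat) =>
        (q.1 ++ [tv], q.2 ++ [rh_min + (k : Int) * rh_step])) acc
    = (acc.1 ++ List.replicate n tv,
       acc.2 ++ (List.range n).map (fun (k : Nat) => rh_min + (k : Int) * rh_step)) := by
  induction n with
  | zero => simp
  | succ m ih =>
      rw [List.range_succ, List.foldl_append, ih]
      simp only [List.foldl_cons, List.foldl_nil, List.replicate_succ', List.map_append,
        List.map_cons, List.map_nil]
      simp [List.append_assoc]

-- A's outer loop over List.range, in closed form.
theorem outer_loop_eq (t_step t_min rh_step rh_min : Int) (m : Nat) (N : Nat)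
    (acc : List Int × List Int) :
    (List.range N).foldl
      (fun (p : List Int × List Int) (i : Nat) =>
        (List.range m).foldl
          (fun (q : List Int × List Int) (k : Nat) =>
            (q.1 ++ [t_min + (i : Int) * t_step], q.2 ++ [rh_min + (k : Int) * rh_step])) p) acc
    = (acc.1 ++ (List.range N).flatMap (fun (i : Nat) => List.replicate m (t_min + (i : Int) * t_step)),
       acc.2 ++ (List.replicate N ((List.range m).map (fun (k : Nat) => rh_min + (k : Int) * rh_step))).flatten) := by
  induction N with
  | zero => simp
  | succ n ih =>
      rw [List.range_succ, List.foldl_append]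
      simp only [List.foldl_cons, List.foldl_nil]
      rw [ih, inner_loop_eq, List.replicate_succ', List.flatten_append, List.flatMap_append]
      simp [List.append_assoc]

-- B's flat-index temperature pass equals the repeat expansion (Nat form).
theorem temps_flat_eq (t_min t_step : Int) (m : Nat) (hm : 0 < m) (N : Nat) :
    (List.range (N * m)).map (fun (k : Nat) => t_min + ((k / m : Nat) : Int) * t_step)
    = (List.range N).flatMap (fun (i : Nat) => List.replicate m (t_min + (i : Int) * t_step)) := by
  induction N with
  | zero => simp
  | succ n ih =>
      have h1 : (n + 1) * m = n * m + m := by ring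
      rw [h1, List.range_add, List.map_append, ih, List.range_succ, List.flatMap_append]
      congr 1
      simp only [List.map_map, List.flatMap_cons, List.flatMap_nil, List.append_nil,
        Function.comp_def]
      have : ∀ r ∈ List.range m,
          t_min + ((((n * m + r) / m : Nat)) : Int) * t_step = t_min + (n : Int) * t_step := by
        intro r hr
        have hrm : r < m := List.mem_range.mp hr
        have : (n * m + r) / m = n := by
          rw [Nat.add_comm, Nat.mul_comm, Nat.add_mul_div_left _ _ hm, Nat.div_eq_of_lt hrm,
            Nat.zero_add]
        rw [this]
      rw [List.map_congr_left this]
      simp [List.map_const']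

-- B's flat-index humidity pass equals the tile expansion (Nat form).
theorem hums_flat_eq (rh_min rh_step : Int) (m : Nat) (N : Nat) :
    (List.range (N * m)).map (fun (k : Nat) => rh_min + ((k % m : Nat) : Int) * rh_step)
    = (List.replicate N ((List.range m).map (fun (k : Nat) => rh_min + (k : Int) * rh_step))).flatten := by
  induction N with
  | zero => simp
  | succ n ih =>
      have h1 : (n + 1) * m = n * m + m := by ring
      rw [h1, List.range_add, List.map_append, ih, List.replicate_succ', List.flatten_append]
      congr 1
      simp only [List.map_map, List.flatten_cons, List.flatten_nil, List.append_nil,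
        Function.comp_def]
      apply List.map_congr_left
      intro r hr
      have hrm : r < m := List.mem_range.mp hr
      have : (n * m + r) % m = r := by
        rw [Nat.add_comm, Nat.mul_comm, Nat.add_mul_mod_self_left, Nat.mod_eq_of_lt hrm]
      rw [this]

-- ===== VERDICT =====
theorem calculate_chamber_steps_spec : Claim_equal_calculate_chamber_steps := by
  intro t_steps t_step t_min rh_steps rh_step rh_min _
  unfold Spec_calculate_chamber_steps calculate_chamber_steps calculate_chamber_steps_alt
  have hr : ∀ b : Int, PySem.List.pyRange 0 b 1
      = (List.range b.toNat).map (fun (k : Nat) => (k : Int)) := by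
    intro b; simp [PySem.List.pyRange_one]
  set N := t_steps.toNat with hN
  set m := rh_steps.toNat with hm
  have htot : (max t_steps 0 * max rh_steps 0).toNat = N * m := by
    have h1 : max t_steps 0 = (N : Int) := by omega
    have h2 : max rh_steps 0 = (m : Int) := by omega
    rw [h1, h2, ← Nat.cast_mul, Int.toNat_natCast]
  simp only [hr, List.foldl_map, List.map_map, Function.comp_def, htot]
  rw [outer_loop_eq t_step t_min rh_step rh_min m N ([], [])]
  by_cases hpos : 0 < rh_steps
  · have hmc : rh_steps = (m : Int) := by omega
    have hmpos : 0 < m := by omega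
    congr 2
    · rw [← temps_flat_eq t_min t_step m hmpos N]
      apply List.map_congr_left
      intro k _
      rw [hmc, PySem.Int.floordiv_natCast]
    · congr 1
      rw [← hums_flat_eq rh_min rh_step m N]
      apply List.map_congr_left
      intro k _
      rw [hmc, PySem.Int.mod_natCast]
  · have hm0 : m = 0 := by omega
    simp [hm0]
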